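-- pv_equiv track=rewrite | github.com/Alone17120000/project_final | python_version/bai_toan_2.py | count_partitions_pk
-- ===== SOURCE A (Python) =====
-- def count_partitions_pk(n, k): # Hàm đếm số phân hoạch của n thành k phần (pₖ(n)).
--     if k <= 0 or n <= 0 or k > n: # Kiểm tra điều kiện biên.
--         return 0 # Trả về 0 nếu không hợp lệ.
--
--     # dp[i][j] sẽ lưu số cách phân hoạch số i thành j phần.
--     dp = [[0] * (k + 1) for _ in range(n + 1)] # Bảng quy hoạch động dp[i][j] = pⱼ(i).
--
--     for i in range(1, n + 1): # Lặp qua các tổng từ 1 đến n.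
--         for j in range(1, k + 1): # Lặp qua số phần tử từ 1 đến k.
--             if i < j: # Nếu tổng nhỏ hơn số phần tử.
--                 dp[i][j] = 0 # Không có cách phân hoạch nào.
--             elif i == j: # Nếu tổng bằng số phần tử.
--                 dp[i][j] = 1
--             else: # Trường hợp tổng quát.
--                 # Áp dụng công thức truy hồi: pₖ(n) = pₖ₋₁(n-1) + pₖ(n-k).
--                 dp[i][j] = dp[i - 1][j - 1] + dp[i - j][j] # Chuyển đổi công thức cho mảng dp.
--
--     return dp[n][k] # Trả về kết quả tại dp[n][k].
-- ===== SOURCE B (Python) =====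
-- def count_partitions_pk(n, k):
--     # Partitions of n into exactly k parts == partitions of n-k into parts of size <= k,
--     # counted by a 1D coin-change DP over part sizes.
--     if k <= 0 or n <= 0 or k > n:
--         return 0
--     m = n - k
--     dp = [1] + [0] * m
--     for s in range(1, k + 1):
--         for t in range(s, m + 1):
--             dp[t] += dp[t - s]
--     return dp[m]
-- ===== Notes on version B (the rewrite author's own statement) =====
-- stated objective: alternative
-- what changed: Replaces the (n+1)x(k+1) table for the recurrence p_k(n)=p_{k-1}(n-1)+p_k(n-k) by a 1D coin-change DP counting partitions of n-k into parts of size at most k, iterating over part sizes; it trades the 2D table for a single dp row of length n-k+1.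
import Mathlib
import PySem

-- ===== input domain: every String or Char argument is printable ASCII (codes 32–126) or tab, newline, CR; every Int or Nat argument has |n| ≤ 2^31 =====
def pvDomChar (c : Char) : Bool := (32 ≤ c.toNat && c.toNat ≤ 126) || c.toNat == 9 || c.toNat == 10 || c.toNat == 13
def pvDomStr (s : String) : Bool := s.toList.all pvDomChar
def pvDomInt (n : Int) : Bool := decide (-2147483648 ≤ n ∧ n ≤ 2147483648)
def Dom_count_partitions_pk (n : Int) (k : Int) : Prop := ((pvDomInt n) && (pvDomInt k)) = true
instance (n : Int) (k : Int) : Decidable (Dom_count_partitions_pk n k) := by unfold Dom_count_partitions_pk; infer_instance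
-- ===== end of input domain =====

-- B replaces A's (n+1)x(k+1) table for p_k(n)=p_{k-1}(n-1)+p_k(n-k) by a 1D coin-change
-- DP counting partitions of n-k into parts of size at most k (a single dp row instead of a 2D table).

-- ===== PORT A =====
def count_partitions_pk (n : Int) (k : Int) : Int :=
  if k ≤ 0 ∨ n ≤ 0 ∨ k > n then 0
  else
    -- dp = [[0] * (k + 1) for _ in range(n + 1)]
    let dp0 : List (List Int) :=
      (PySem.List.pyRange 0 (n + 1) 1).map (fun _ => PySem.List.pyRepeat [0] (k + 1))
    -- nested for-loops; dp[i][j] = v via pySetD, reads via pyGetD (all indices in range)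
    let dp :=
      (PySem.List.pyRange 1 (n + 1) 1).foldl (fun dp i =>
        (PySem.List.pyRange 1 (k + 1) 1).foldl (fun dp j =>
          let v : Int :=
            if i < j then 0
            else if i = j then 1
            else PySem.List.pyGetD (PySem.List.pyGetD dp (i - 1) []) (j - 1) 0 +
                 PySem.List.pyGetD (PySem.List.pyGetD dp (i - j) []) j 0
          PySem.List.pySetD dp i (PySem.List.pySetD (PySem.List.pyGetD dp i []) j v)) dp) dp0
    PySem.List.pyGetD (PySem.List.pyGetD dp n []) k 0

-- ===== PORT B =====
def count_partitions_pk_alt (n : Int) (k : Int) : Int :=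
  if k ≤ 0 ∨ n ≤ 0 ∨ k > n then 0
  else
    let m := n - k
    -- dp = [1] + [0] * m
    let dp0 : List Int := 1 :: PySem.List.pyRepeat [0] m
    let dp :=
      (PySem.List.pyRange 1 (k + 1) 1).foldl (fun dp s =>
        (PySem.List.pyRange s (m + 1) 1).foldl (fun dp t =>
          PySem.List.pySetD dp t
            (PySem.List.pyGetD dp t 0 + PySem.List.pyGetD dp (t - s) 0)) dp) dp0
    PySem.List.pyGetD dp m 0

-- ===== PRECONDITION & SPEC =====
def Spec_count_partitions_pk (n : Int) (k : Int) (out : Int) : Prop := out = count_partitions_pk_alt n k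
instance (n : Int) (k : Int) (out : Int) : Decidable (Spec_count_partitions_pk n k out) := by unfold Spec_count_partitions_pk; infer_instance

-- ===== CLAIM (what is proved, stated in full; the proofs are below) =====
def Claim_equal_count_partitions_pk : Prop := ∀ (n : Int) (k : Int), Dom_count_partitions_pk n k → Spec_count_partitions_pk n k (count_partitions_pk n k)

-- ===== LEMMAS AND PROOFS =====

-- p_j(i): number of partitions of i into exactly j parts (A's recurrence, math form)
def pvP (i j : Nat) : Int :=
  if i = 0 ∨ j = 0 then 0
  else if i < j then 0
  else if i = j then 1
  else pvP (i - 1) (j - 1) + pvP (i - j) j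
termination_by i
decreasing_by all_goals omega

-- C s t: number of partitions of t into parts of size at most s (B's recurrence)
def pvC (s t : Nat) : Int :=
  if s = 0 then (if t = 0 then 1 else 0)
  else pvC (s - 1) t + (if s ≤ t then pvC s (t - s) else 0)
termination_by (s, t)
decreasing_by all_goals omega

lemma pvP_zero_left (c : Nat) : pvP 0 c = 0 := by rw [pvP]; simp

lemma pvP_zero_right (r : Nat) : pvP r 0 = 0 := by rw [pvP]; simp

lemma pvC_zero_right (s : Nat) : pvC s 0 = 1 := by
  induction s with
  | zero => rw [pvC]; simp
  | succ s ih => rw [pvC]; simp [ih]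

lemma pvC_of_lt {s t : Nat} (hs : 1 ≤ s) (h : t < s) : pvC s t = pvC (s - 1) t := by
  rw [pvC]; simp [Nat.not_le.mpr h]; omega

-- the bijection: partitions of n into exactly k parts = partitions of n-k into parts ≤ k
lemma pvP_eq_pvC : ∀ (n : Nat) (k : Nat), 1 ≤ k → k ≤ n → pvP n k = pvC k (n - k) := by
  intro n
  induction n using Nat.strong_induction_on with
  | _ n ih =>
    intro k hk1 hk2
    by_cases heq : n = k
    · subst heq
      rw [pvP, if_neg (by omega), if_neg (by omega), if_pos rfl]
      simp [pvC_zero_right]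
    · have hlt : k < n := by omega
      rw [pvP, if_neg (by omega), if_neg (by omega), if_neg heq]
      rw [pvC, if_neg (by omega)]
      have hterm1 : pvP (n - 1) (k - 1) = pvC (k - 1) (n - k) := by
        by_cases hk1' : k = 1
        · subst hk1'
          rw [pvP_zero_right, pvC, if_pos rfl, if_neg (by omega)]
        · have := ih (n - 1) (by omega) (k - 1) (by omega) (by omega)
          rw [this]
          congr 1
          omega
      have hterm2 : pvP (n - k) k = if k ≤ n - k then pvC k (n - k - k) else 0 := by
        by_cases hle : k ≤ n - k
        · rw [if_pos hle]
          exact ih (n - k) (by omega) k hk1 hle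
        · rw [if_neg hle]
          rw [pvP, if_neg (by omega), if_pos (by omega)]
      rw [hterm1, hterm2]

-- generic loop invariant for a fold over pyRange a b 1
lemma pv_foldl_aux {σ : Type} (step : σ → Int → σ) (f : Int → σ) :
    ∀ (d : Nat) (a : Int), (∀ x, a ≤ x → x < a + d → step (f x) x = f (x + 1)) →
      (PySem.List.pyRange a (a + d) 1).foldl step (f a) = f (a + (d : Int)) := by
  intro d
  induction d with
  | zero => intro a _; simp [PySem.List.pyRange_one_eq_nil (le_refl a)]
  | succ d ih =>
    intro a h
    have hcons : PySem.List.pyRange a (a + (d + 1 : Nat)) 1 = a :: PySem.List.pyRange (a + 1) (a + (d + 1 : Nat)) 1 :=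
      PySem.List.pyRange_one_cons (by push_cast; omega)
    have hstep : step (f a) a = f (a + 1) := h a (le_refl a) (by push_cast; omega)
    have hrw : a + ((d + 1 : Nat) : Int) = (a + 1) + (d : Int) := by push_cast; ring
    have := ih (a + 1) (by intro x hx1 hx2; exact h x (by omega) (by push_cast at hx2 ⊢; omega))
    rw [hcons]
    simp only [List.foldl_cons, hstep, hrw]
    exact this

lemma pv_foldl_inv {σ : Type} (step : σ → Int → σ) (f : Int → σ) (a b : Int) (hab : a ≤ b)
    (h : ∀ x, a ≤ x → x < b → step (f x) x = f (x + 1)) :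
    (PySem.List.pyRange a b 1).foldl step (f a) = f b := by
  have hb : b = a + ((b - a).toNat : Int) := by omega
  rw [hb] at h ⊢
  exact pv_foldl_aux step f (b - a).toNat a h

lemma pv_set_map_range {α : Type} (f : Nat → α) (N i : Nat) (v : α) (h : i < N) :
    ((List.range N).map f).set i v = (List.range N).map (fun u => if u = i then v else f u) := by
  apply List.ext_getElem
  · simp
  · intro u h1 h2
    by_cases hu : u = i
    · subst hu; simp
    · simp only [List.getElem_set, List.getElem_map, List.getElem_range, if_neg (fun h => hu h)]
      rw [if_neg (fun h => hu h.symm)]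

lemma pv_getD_map_range {α : Type} (f : Nat → α) (N : Nat) (i : Int) (d : α)
    (h0 : 0 ≤ i) (h1 : i < (N : Int)) :
    PySem.List.pyGetD ((List.range N).map f) i d = f i.toNat := by
  rw [PySem.List.pyGetD_of_nonneg _ _ h0]
  exact PySem.List.getD_map_range f N i.toNat d (by omega)

-- ---- A side ----

-- A's table after processing rows < x fully and, in row x, columns 1..j-1
def pvE (x j : Int) (r c : Nat) : Int :=
  if (r : Int) < x ∨ ((r : Int) = x ∧ 1 ≤ (c : Int) ∧ (c : Int) < j) then pvP r c else 0

def pvA (N K : Nat) (x j : Int) : List (List Int) :=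
  (List.range (N + 1)).map (fun r => (List.range (K + 1)).map (fun c => pvE x j r c))

lemma pvA_read (N K : Nat) (x j : Int) (r c : Int) (hr : 0 ≤ r) (hrN : r < (N : Int) + 1)
    (hc : 0 ≤ c) (hcK : c < (K : Int) + 1) :
    PySem.List.pyGetD (PySem.List.pyGetD (pvA N K x j) r []) c 0 = pvE x j r.toNat c.toNat := by
  unfold pvA
  rw [pv_getD_map_range _ (N + 1) r [] hr (by push_cast; omega)]
  rw [pv_getD_map_range _ (K + 1) c 0 hc (by push_cast; omega)]

lemma pv_pvE_congr (x j j' : Int) (r c : Nat) (_hx : 1 ≤ x)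
    (hcond : ((r : Int) < x ∨ ((r : Int) = x ∧ 1 ≤ (c : Int) ∧ (c : Int) < j)) ↔
             ((r : Int) < x ∨ ((r : Int) = x ∧ 1 ≤ (c : Int) ∧ (c : Int) < j'))) :
    pvE x j r c = pvE x j' r c := by
  unfold pvE
  split_ifs with hA hB
  · rfl
  · exact absurd (hcond.mp hA) hB
  · exact absurd (hcond.mpr (by assumption)) hA
  · rfl

lemma countA_eq (n k : Int) (h1 : 0 < k) (h2 : 0 < n) (h3 : k ≤ n) :
    count_partitions_pk n k = pvP n.toNat k.toNat := by
  have hg : ¬(k ≤ 0 ∨ n ≤ 0 ∨ k > n) := by omega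
  unfold count_partitions_pk
  rw [if_neg hg]
  dsimp only
  set N := n.toNat with hN
  set K := k.toNat with hK
  have hinit : (PySem.List.pyRange 0 (n + 1) 1).map (fun _ => PySem.List.pyRepeat [(0 : Int)] (k + 1)) = pvA N K 1 1 := by
    rw [PySem.List.pyRepeat_singleton]
    unfold pvA
    apply List.ext_getElem
    · simp; omega
    · intro r hr1 hr2
      simp only [List.getElem_map, List.length_map, PySem.List.length_pyRange_one, List.length_range] at hr1 hr2 ⊢
      rw [List.getElem_range]
      apply List.ext_getElem
      · simp; omega
      · intro c hc1 hc2
        simp only [List.getElem_replicate, List.getElem_map, List.getElem_range, List.length_map, List.length_range] at hc1 hc2 ⊢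
        unfold pvE
        split_ifs with hA
        · rcases hA with hA | hA
          · have : r = 0 := by omega
            subst this
            rw [pvP_zero_left]
          · exfalso; omega
        · rfl
  have hstepfinal : ∀ x : Int, 1 ≤ x → pvA N K x (k + 1) = pvA N K (x + 1) 1 := by
    intro x _hx
    unfold pvA
    apply List.map_congr_left
    intro r hr
    rw [List.mem_range] at hr
    apply List.map_congr_left
    intro c hc
    rw [List.mem_range] at hc
    unfold pvE
    split_ifs with hA hB
    · rfl
    · exfalso; omega
    · -- r = x, c = 0 in the only non-trivial case
      have hrx : (r : Int) = x := by omega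
      have hc0 : c = 0 := by omega
      subst hc0
      rw [pvP_zero_right]
    · rfl
  have houter : ∀ x, 1 ≤ x → x < n + 1 →
      (fun dp i => (PySem.List.pyRange 1 (k + 1) 1).foldl (fun dp j =>
        PySem.List.pySetD dp i (PySem.List.pySetD (PySem.List.pyGetD dp i []) j
          (if i < j then 0
           else if i = j then 1
           else PySem.List.pyGetD (PySem.List.pyGetD dp (i - 1) []) (j - 1) 0 +
                PySem.List.pyGetD (PySem.List.pyGetD dp (i - j) []) j 0))) dp) (pvA N K x 1) x
      = pvA N K (x + 1) 1 := by
    intro x hx1 hx2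
    dsimp only
    have hinner : ∀ j, 1 ≤ j → j < k + 1 →
        (fun dp j => PySem.List.pySetD dp x (PySem.List.pySetD (PySem.List.pyGetD dp x []) j
          (if x < j then 0
           else if x = j then 1
           else PySem.List.pyGetD (PySem.List.pyGetD dp (x - 1) []) (j - 1) 0 +
                PySem.List.pyGetD (PySem.List.pyGetD dp (x - j) []) j 0))) (pvA N K x j) j
        = pvA N K x (j + 1) := by
      intro j hj1 hj2
      dsimp only
      have hx0 : (0 : Int) ≤ x := by omega
      have hj0 : (0 : Int) ≤ j := by omega
      -- the value written is pvP x.toNat j.toNat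
      have hv : (if x < j then 0
           else if x = j then 1
           else PySem.List.pyGetD (PySem.List.pyGetD (pvA N K x j) (x - 1) []) (j - 1) 0 +
                PySem.List.pyGetD (PySem.List.pyGetD (pvA N K x j) (x - j) []) j 0)
          = pvP x.toNat j.toNat := by
        by_cases hlt : x < j
        · rw [if_pos hlt, pvP, if_neg (by omega), if_pos (by omega)]
        · by_cases heq : x = j
          · rw [if_neg hlt, if_pos heq, pvP, if_neg (by omega), if_neg (by omega), if_pos (by omega)]
          · rw [if_neg hlt, if_neg heq]
            rw [pvA_read N K x j (x - 1) (j - 1) (by omega) (by omega) (by omega) (by omega)]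
            rw [pvA_read N K x j (x - j) j (by omega) (by omega) (by omega) (by omega)]
            unfold pvE
            rw [if_pos (Or.inl (by omega)), if_pos (Or.inl (by omega))]
            conv_rhs => rw [pvP]
            rw [if_neg (by omega), if_neg (by omega), if_neg (by omega)]
            congr 1 <;> congr 1 <;> omega
      rw [hv]
      -- the row read
      have hrow : PySem.List.pyGetD (pvA N K x j) x [] = (List.range (K + 1)).map (fun c => pvE x j x.toNat c) := by
        unfold pvA
        rw [pv_getD_map_range _ (N + 1) x [] hx0 (by push_cast; omega)]
      rw [hrow, PySem.List.pySetD_of_nonneg _ _ hj0,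
          pv_set_map_range _ (K + 1) j.toNat _ (by omega)]
      unfold pvA
      rw [PySem.List.pySetD_of_nonneg _ _ hx0,
          pv_set_map_range _ (N + 1) x.toNat _ (by omega)]
      apply List.map_congr_left
      intro r hr
      rw [List.mem_range] at hr
      by_cases hrx : r = x.toNat
      · subst hrx
        rw [if_pos rfl]
        apply List.map_congr_left
        intro c hc
        rw [List.mem_range] at hc
        by_cases hcj : c = j.toNat
        · subst hcj
          rw [if_pos rfl]
          unfold pvE
          rw [if_pos (Or.inr (by omega))]
        · rw [if_neg hcj]
          exact pv_pvE_congr x j (j + 1) x.toNat c (by omega) (by omega)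
      · rw [if_neg hrx]
        apply List.map_congr_left
        intro c hc
        rw [List.mem_range] at hc
        exact pv_pvE_congr x j (j + 1) r c (by omega) (by omega)
    have hrun := pv_foldl_inv
      (fun dp j => PySem.List.pySetD dp x (PySem.List.pySetD (PySem.List.pyGetD dp x []) j
        (if x < j then 0
         else if x = j then 1
         else PySem.List.pyGetD (PySem.List.pyGetD dp (x - 1) []) (j - 1) 0 +
              PySem.List.pyGetD (PySem.List.pyGetD dp (x - j) []) j 0)))
      (pvA N K x) 1 (k + 1) (by omega) hinner
    rw [hrun]
    exact hstepfinal x (by omega)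
  have hmain := pv_foldl_inv
    (fun dp i => (PySem.List.pyRange 1 (k + 1) 1).foldl (fun dp j =>
      PySem.List.pySetD dp i (PySem.List.pySetD (PySem.List.pyGetD dp i []) j
        (if i < j then 0
         else if i = j then 1
         else PySem.List.pyGetD (PySem.List.pyGetD dp (i - 1) []) (j - 1) 0 +
              PySem.List.pyGetD (PySem.List.pyGetD dp (i - j) []) j 0))) dp)
    (fun x => pvA N K x 1) 1 (n + 1) (by omega) houter
  dsimp only at hmain
  rw [hinit, hmain]
  rw [pvA_read N K (n + 1) 1 n k (by omega) (by omega) (by omega) (by omega)]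
  unfold pvE
  rw [if_pos (Or.inl (by omega))]

-- ---- B side ----

def pvB (M : Nat) (s t : Int) : List Int :=
  (List.range (M + 1)).map (fun (u : Nat) => if (u : Int) < t then pvC s.toNat u else pvC (s.toNat - 1) u)

lemma pvC_zero_left (t : Nat) : pvC 0 t = if t = 0 then 1 else 0 := by
  rw [pvC]; simp

lemma pv_init_list (M : Nat) : (List.range (M + 1)).map (fun u => pvC 0 u) = 1 :: List.replicate M 0 := by
  apply List.ext_getElem
  · simp
  · intro i h1 h2
    simp only [List.getElem_map, List.getElem_range]
    cases i with
    | zero => simp [pvC_zero_left]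
    | succ i =>
      simp only [List.getElem_cons_succ, List.getElem_replicate]
      rw [pvC_zero_left, if_neg (by omega)]

lemma countB_eq (n k : Int) (h1 : 0 < k) (h2 : 0 < n) (h3 : k ≤ n) :
    count_partitions_pk_alt n k = pvC k.toNat (n - k).toNat := by
  have hg : ¬(k ≤ 0 ∨ n ≤ 0 ∨ k > n) := by omega
  unfold count_partitions_pk_alt
  rw [if_neg hg]
  dsimp only
  set M := (n - k).toNat with hM
  set fO : Int → List Int := fun s => (List.range (M + 1)).map (fun u => pvC (s - 1).toNat u) with hfO
  have hinit : (1 :: PySem.List.pyRepeat [(0 : Int)] (n - k)) = fO 1 := by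
    rw [PySem.List.pyRepeat_singleton, hfO]
    dsimp only
    simp only [show ((1 : Int) - 1).toNat = 0 from rfl]
    rw [pv_init_list, ← hM]
  have houter : ∀ s, 1 ≤ s → s < k + 1 →
      (fun dp s => (PySem.List.pyRange s (n - k + 1) 1).foldl (fun dp t =>
        PySem.List.pySetD dp t
          (PySem.List.pyGetD dp t 0 + PySem.List.pyGetD dp (t - s) 0)) dp) (fO s) s = fO (s + 1) := by
    intro s hs1 hs2
    dsimp only
    have e1 : (s - 1).toNat = s.toNat - 1 := by omega
    have e2 : (s + 1 - 1).toNat = s.toNat := by omega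
    by_cases hsm : s ≤ n - k
    · -- run the inner loop with invariant pvB M s
      have hstart : fO s = pvB M s s := by
        rw [hfO]
        unfold pvB
        apply List.map_congr_left
        intro u hu
        rw [List.mem_range] at hu
        rw [e1]
        by_cases hus : (u : Int) < s
        · rw [if_pos hus, pvC_of_lt (s := s.toNat) (t := u) (by omega) (by omega)]
        · rw [if_neg hus]
      have hinner : ∀ t, s ≤ t → t < n - k + 1 →
          (fun dp t => PySem.List.pySetD dp t
            (PySem.List.pyGetD dp t 0 + PySem.List.pyGetD dp (t - s) 0)) (pvB M s t) t
          = pvB M s (t + 1) := by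
        intro t ht1 ht2
        dsimp only
        have ht0 : (0 : Int) ≤ t := by omega
        have hget1 : PySem.List.pyGetD (pvB M s t) t 0 = pvC (s.toNat - 1) t.toNat := by
          unfold pvB
          rw [pv_getD_map_range _ (M + 1) t 0 ht0 (by push_cast; omega)]
          rw [if_neg (by omega)]
        have hget2 : PySem.List.pyGetD (pvB M s t) (t - s) 0 = pvC s.toNat (t.toNat - s.toNat) := by
          unfold pvB
          rw [pv_getD_map_range _ (M + 1) (t - s) 0 (by omega) (by push_cast; omega)]
          rw [if_pos (by omega)]
          congr 1
          omega
        rw [hget1, hget2]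
        have hval : pvC (s.toNat - 1) t.toNat + pvC s.toNat (t.toNat - s.toNat) = pvC s.toNat t.toNat := by
          conv_rhs => rw [pvC]
          rw [if_neg (by omega), if_pos (by omega)]
        rw [hval]
        unfold pvB
        rw [PySem.List.pySetD_of_nonneg _ _ ht0]
        rw [pv_set_map_range _ (M + 1) t.toNat _ (by omega)]
        apply List.map_congr_left
        intro u hu
        rw [List.mem_range] at hu
        by_cases hut : u = t.toNat
        · subst hut
          rw [if_pos rfl, if_pos (by omega)]
        · rw [if_neg hut]
          by_cases hult : (u : Int) < t
          · rw [if_pos hult, if_pos (by omega)]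
          · rw [if_neg hult, if_neg (by omega)]
      have hrun := pv_foldl_inv
        (fun dp t => PySem.List.pySetD dp t
          (PySem.List.pyGetD dp t 0 + PySem.List.pyGetD dp (t - s) 0))
        (pvB M s) s (n - k + 1) (by omega) hinner
      rw [hstart, hrun]
      -- pvB M s (m+1) = fO (s+1)
      unfold pvB
      rw [hfO]
      dsimp only
      apply List.map_congr_left
      intro u hu
      rw [List.mem_range] at hu
      rw [if_pos (by omega), e2]
    · -- empty inner range: the row is already correct
      rw [PySem.List.pyRange_one_eq_nil (by omega)]
      simp only [List.foldl_nil, hfO]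
      apply List.map_congr_left
      intro u hu
      rw [List.mem_range] at hu
      rw [e1, e2, pvC_of_lt (s := s.toNat) (t := u) (by omega) (by omega)]
  have hmain := pv_foldl_inv
    (fun dp s => (PySem.List.pyRange s (n - k + 1) 1).foldl (fun dp t =>
      PySem.List.pySetD dp t
        (PySem.List.pyGetD dp t 0 + PySem.List.pyGetD dp (t - s) 0)) dp)
    fO 1 (k + 1) (by omega) houter
  rw [hinit, hmain, hfO]
  dsimp only
  rw [pv_getD_map_range _ (M + 1) (n - k) 0 (by omega) (by push_cast; omega)]
  congr 1
  omega

-- ===== VERDICT (by name: the statement is the Claim_ definition above) =====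
theorem count_partitions_pk_spec : Claim_equal_count_partitions_pk := by
  intro n k _
  unfold Spec_count_partitions_pk
  by_cases hg : k ≤ 0 ∨ n ≤ 0 ∨ k > n
  · unfold count_partitions_pk count_partitions_pk_alt
    simp [hg]
  · have hk : 0 < k := by omega
    have hn : 0 < n := by omega
    have hkn : k ≤ n := by omega
    rw [countA_eq n k hk hn hkn, countB_eq n k hk hn hkn]
    rw [pvP_eq_pvC n.toNat k.toNat (by omega) (by omega)]
    congr 1
    omega
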